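-- pv_equiv track=rewrite | github.com/antoniokrsoski/AWS-EITN41 | m1/m1p1.py | luhns
-- ===== SOURCE A (Python) =====
-- def luhns(card_nbr):
--     def luhn_sum(digits):
--         sum = 0
--         for index, digit in enumerate(reversed(digits)):
--             if index % 2 == 0: #even
--                 sum += digit
--             else:
--                 doubled = digit * 2
--                 sum += doubled if doubled < 10 else doubled - 9 # we just count digits not the numbers
--         return sum
--
--     x_index = card_nbr.index('X')
--
--     digits = [int(d) if d.isdigit() else 0 for d in card_nbr]
--
--     for x in range(10):
--         digits[x_index] = x
--         if luhn_sum(digits) % 10 == 0: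
--             return x
-- ===== SOURCE B (Python) =====
-- def luhns(card_nbr):
--     x_index = card_nbr.index('X')
--     digits = [int(d) if d.isdigit() else 0 for d in card_nbr]
--     base = 0
--     n = len(digits)
--     for i, d in enumerate(digits):
--         if (n - 1 - i) % 2 == 0:
--             base += d
--         else:
--             doubled = d * 2
--             base += doubled if doubled < 10 else doubled - 9
--     need = (-base) % 10
--     if (n - 1 - x_index) % 2 == 0:
--         return need
--     return {0: 0, 2: 1, 4: 2, 6: 3, 8: 4, 1: 5, 3: 6, 5: 7, 7: 8, 9: 9}[need]
-- ===== Notes on version B (the rewrite author's own statement) =====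
-- stated objective: faster
-- what changed: A tries all ten candidate digits, rebuilding the full Luhn sum for each; B runs the Luhn pass once (the X position contributing 0) and obtains the digit in closed form from the position parity, inverting the doubled-digit map with a precomputed table.
import Mathlib
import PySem

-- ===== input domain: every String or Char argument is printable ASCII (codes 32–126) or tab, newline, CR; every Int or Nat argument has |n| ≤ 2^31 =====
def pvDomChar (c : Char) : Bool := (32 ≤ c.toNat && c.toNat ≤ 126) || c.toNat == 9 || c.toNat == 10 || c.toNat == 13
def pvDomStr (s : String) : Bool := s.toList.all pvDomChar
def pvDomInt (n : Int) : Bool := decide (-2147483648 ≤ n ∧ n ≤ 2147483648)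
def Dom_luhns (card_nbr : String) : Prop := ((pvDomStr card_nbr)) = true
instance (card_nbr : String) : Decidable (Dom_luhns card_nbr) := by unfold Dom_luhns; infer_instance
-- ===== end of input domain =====

-- B replaces A's try-all-ten-digits search by one Luhn pass plus a closed-form/inverse-table
-- answer from the position parity of 'X' (objective: faster by a constant factor).

-- ===== PORT A =====
-- [int(d) if d.isdigit() else 0 for d in card_nbr]  (int(d) on a digit char is exact as toNat-48 on ASCII)
def pvDigit (c : Char) : Int := if PySem.Chars.isdigit c then ((c.toNat : Int) - 48) else 0

-- the inner 'for index, digit in enumerate(reversed(digits))' loop, state = (index, sum)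
def luhnSumGo (index : Nat) (sum : Int) : List Int → Int
  | [] => sum
  | digit :: rest =>
    if index % 2 == 0 then luhnSumGo (index + 1) (sum + digit) rest
    else luhnSumGo (index + 1) (sum + (if digit * 2 < 10 then digit * 2 else digit * 2 - 9)) rest

def luhnSum (digits : List Int) : Int := luhnSumGo 0 0 digits.reverse

-- 'for x in range(10): digits[x_index] = x; if luhn_sum(digits) % 10 == 0: return x'
def luhnsLoop (x_index : Nat) (digits : List Int) : List Int → Option Int
  | [] => none
  | x :: rest =>
    let d := digits.set x_index x
    if PySem.Int.mod (luhnSum d) 10 == 0 then some x else luhnsLoop x_index d rest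

def luhns (card_nbr : String) : Option Int :=
  let cs := card_nbr.toList
  let f := PySem.Chars.find cs ['X']   -- card_nbr.index('X'); ValueError (none) if absent
  if f < 0 then none
  else luhnsLoop f.toNat (cs.map pvDigit) (PySem.List.pyRange 0 10 1)

-- ===== PORT B =====
-- single forward Luhn pass of Source B: 'for i, d in enumerate(digits)' with weight parity (n-1-i)%2
def luhnBaseGo (n : Nat) (i : Nat) (base : Int) : List Int → Int
  | [] => base
  | d :: rest =>
    if (n - 1 - i) % 2 == 0 then luhnBaseGo n (i + 1) (base + d) rest
    else luhnBaseGo n (i + 1) (base + (if d * 2 < 10 then d * 2 else d * 2 - 9)) rest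

def luhnInv : PySem.Dict Int Int :=
  PySem.Dict.ofList [((0:Int), (0:Int)), (2, 1), (4, 2), (6, 3), (8, 4), (1, 5), (3, 6), (5, 7), (7, 8), (9, 9)]

def luhns_alt (card_nbr : String) : Option Int :=
  let cs := card_nbr.toList
  let f := PySem.Chars.find cs ['X']   -- card_nbr.index('X'); ValueError (none) if absent
  if f < 0 then none
  else
    let digits := cs.map pvDigit
    let n := digits.length
    let base := luhnBaseGo n 0 0 digits
    let need := PySem.Int.mod (-base) 10
    if (n - 1 - f.toNat) % 2 == 0 then some need
    else luhnInv.get? need   -- {…}[need]; a missing key would be a KeyError (none)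

-- ===== PRECONDITION & SPEC =====
-- A raises ValueError (from str.index) when the character X does not occur in card_nbr; exactly those inputs are excluded.
def Pre_luhns (card_nbr : String) : Prop := PySem.Str.isIn "X" card_nbr = true
instance (card_nbr : String) : Decidable (Pre_luhns card_nbr) := by unfold Pre_luhns; infer_instance
def pvWitness_luhns : String := "51X4"

def Spec_luhns (card_nbr : String) (out : Option Int) : Prop := out = luhns_alt card_nbr
instance (card_nbr : String) (out : Option Int) : Decidable (Spec_luhns card_nbr out) := by unfold Spec_luhns; infer_instance

-- ===== CLAIM (what is proved, stated in full; the proofs are below) =====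
def Claim_equal_luhns : Prop := ∀ (card_nbr : String), Dom_luhns card_nbr → Pre_luhns card_nbr → Spec_luhns card_nbr (luhns card_nbr)

-- ===== LEMMAS AND PROOFS =====

-- the per-digit Luhn weight at reversed index p
def lw (p : Nat) (x : Int) : Int :=
  if p % 2 == 0 then x else (if x * 2 < 10 then x * 2 else x * 2 - 9)

theorem luhnSumGo_acc (l : List Int) (i : Nat) (s : Int) :
    luhnSumGo i s l = s + luhnSumGo i 0 l := by
  induction l generalizing i s with
  | nil => simp [luhnSumGo]
  | cons d rest ih =>
    simp only [luhnSumGo]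
    split
    · rw [ih _ (s + d), ih _ (0 + d)]; ring
    · rw [ih _ (s + _), ih _ (0 + _)]; ring

theorem luhnSumGo_cons (i : Nat) (d : Int) (l : List Int) :
    luhnSumGo i 0 (d :: l) = lw i d + luhnSumGo (i + 1) 0 l := by
  simp only [luhnSumGo, lw]
  split <;> rw [luhnSumGo_acc] <;> ring

theorem luhnSumGo_set (m : List Int) (i k : Nat) (x : Int) (hk : k < m.length) :
    luhnSumGo i 0 (m.set k x) = luhnSumGo i 0 (m.set k 0) + lw (i + k) x := by
  induction m generalizing i k with
  | nil => simp at hk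
  | cons d rest ih =>
    cases k with
    | zero =>
      simp only [List.set_cons_zero, luhnSumGo_cons]
      have h0 : lw i 0 = 0 := by unfold lw; split <;> norm_num
      rw [h0, Nat.add_zero]; ring_nf
    | succ k' =>
      simp only [List.set_cons_succ, luhnSumGo_cons]
      rw [ih (i + 1) k' (by simpa using hk)]
      have : i + 1 + k' = i + (k' + 1) := by omega
      rw [this]; ring

theorem luhnSumGo_append (u : List Int) (d : Int) (i : Nat) :
    luhnSumGo i 0 (u ++ [d]) = luhnSumGo i 0 u + lw (i + u.length) d := by
  induction u generalizing i with
  | nil => simp [luhnSumGo_cons, luhnSumGo]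
  | cons a rest ih =>
    simp only [List.cons_append, luhnSumGo_cons, ih (i + 1)]
    have : i + 1 + rest.length = i + (rest.length + 1) := by omega
    rw [this]; simp [List.length_cons]; ring

theorem luhnBaseGo_acc (l : List Int) (n i : Nat) (s : Int) :
    luhnBaseGo n i s l = s + luhnBaseGo n i 0 l := by
  induction l generalizing i s with
  | nil => simp [luhnBaseGo]
  | cons d rest ih =>
    simp only [luhnBaseGo]
    split
    · rw [ih _ (s + d), ih _ (0 + d)]; ring
    · rw [ih _ (s + _), ih _ (0 + _)]; ring

-- the forward pass of B computes A's reversed Luhn sum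
theorem luhnBaseGo_eq (l : List Int) (n i : Nat) (h : i + l.length = n) :
    luhnBaseGo n i 0 l = luhnSumGo 0 0 l.reverse := by
  induction l generalizing i with
  | nil => simp [luhnBaseGo, luhnSumGo]
  | cons d rest ih =>
    have hn : n - 1 - i = rest.length := by simp at h; omega
    simp only [luhnBaseGo, List.reverse_cons, luhnSumGo_append,
      Nat.zero_add, List.length_reverse, hn, lw]
    split <;> (rw [luhnBaseGo_acc, ih (i + 1) (by simp at h ⊢; omega)]; ring)

theorem reverse_set (l : List Int) (j : Nat) (x : Int) (hj : j < l.length) :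
    (l.set j x).reverse = l.reverse.set (l.length - 1 - j) x := by
  apply List.ext_getElem
  · simp
  · intro i h1 h2
    have hi : i < l.length := by simpa using h1
    rw [List.getElem_reverse]
    simp only [List.getElem_set, List.getElem_reverse, List.length_set]
    split <;> split <;> first | rfl | omega

theorem set_self_zero (l : List Int) (j : Nat) (hj : j < l.length) (h0 : l[j] = 0) :
    l.set j 0 = l := by
  apply List.ext_getElem
  · simp
  · intro i h1 h2
    simp only [List.getElem_set]
    split
    · rename_i hji
      subst hji
      exact h0.symm
    · rfl

-- setting j-th digit x changes the Luhn sum by lw (n-1-j) x, when the j-th digit is 0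
theorem luhnSum_set (digits : List Int) (j : Nat) (x : Int) (hj : j < digits.length)
    (h0 : digits[j] = 0) :
    luhnSum (digits.set j x) = luhnSum digits + lw (digits.length - 1 - j) x := by
  unfold luhnSum
  rw [reverse_set _ _ _ hj,
      luhnSumGo_set _ 0 (digits.length - 1 - j) x (by simp; omega)]
  rw [show digits.reverse.set (digits.length - 1 - j) 0 = digits.reverse by
    rw [← reverse_set _ _ _ hj, set_self_zero _ _ hj h0]]
  simp


-- first x in 0..9 accepted by the loop, undoubled (even reversed-position) case
theorem arith_even (base : Int) (k : Nat) (hk : k % 2 = 0) :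
    (if (base + lw k 0) % 10 = 0 then some (0:Int) else
     if (base + lw k 1) % 10 = 0 then some 1 else
     if (base + lw k 2) % 10 = 0 then some 2 else
     if (base + lw k 3) % 10 = 0 then some 3 else
     if (base + lw k 4) % 10 = 0 then some 4 else
     if (base + lw k 5) % 10 = 0 then some 5 else
     if (base + lw k 6) % 10 = 0 then some 6 else
     if (base + lw k 7) % 10 = 0 then some 7 else
     if (base + lw k 8) % 10 = 0 then some 8 else
     if (base + lw k 9) % 10 = 0 then some 9 else none) = some ((-base) % 10) := by
  have h : ∀ x : Int, lw k x = x := by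
    intro x; unfold lw; rw [hk]; simp
  simp only [h]
  split_ifs <;> first
    | (simp only [Option.some.injEq]; omega)
    | (exfalso; omega)

-- doubled (odd reversed-position) case, against the inverse table
theorem arith_odd (base : Int) (k : Nat) (hk : k % 2 = 1) :
    (if (base + lw k 0) % 10 = 0 then some (0:Int) else
     if (base + lw k 1) % 10 = 0 then some 1 else
     if (base + lw k 2) % 10 = 0 then some 2 else
     if (base + lw k 3) % 10 = 0 then some 3 else
     if (base + lw k 4) % 10 = 0 then some 4 else
     if (base + lw k 5) % 10 = 0 then some 5 else
     if (base + lw k 6) % 10 = 0 then some 6 else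
     if (base + lw k 7) % 10 = 0 then some 7 else
     if (base + lw k 8) % 10 = 0 then some 8 else
     if (base + lw k 9) % 10 = 0 then some 9 else none) = luhnInv.get? ((-base) % 10) := by
  have h : ∀ x : Int, lw k x = (if x * 2 < 10 then x * 2 else x * 2 - 9) := by
    intro x; unfold lw; rw [hk]; simp
  simp only [h]
  norm_num
  split_ifs <;> first
    | (exfalso; omega)
    | (rw [show -base % 10 = (0:Int) from by omega]; decide)
    | (rw [show -base % 10 = (1:Int) from by omega]; decide)
    | (rw [show -base % 10 = (2:Int) from by omega]; decide)
    | (rw [show -base % 10 = (3:Int) from by omega]; decide)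
    | (rw [show -base % 10 = (4:Int) from by omega]; decide)
    | (rw [show -base % 10 = (5:Int) from by omega]; decide)
    | (rw [show -base % 10 = (6:Int) from by omega]; decide)
    | (rw [show -base % 10 = (7:Int) from by omega]; decide)
    | (rw [show -base % 10 = (8:Int) from by omega]; decide)
    | (rw [show -base % 10 = (9:Int) from by omega]; decide)

-- ===== VERDICT (by name: the statement is the Claim_ definition above) =====
theorem luhns_spec : Claim_equal_luhns := by
  intro s _ hpre
  unfold Spec_luhns luhns luhns_alt
  have hinf : ['X'] <:+: s.toList := by
    have := (PySem.Str.isIn_iff_infix (sub := "X") (s := s)).mp hpre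
    simpa using this
  have hf : 0 ≤ PySem.Chars.find s.toList ['X'] := (PySem.Chars.find_nonneg_iff _ _).mpr hinf
  have hnneg : ¬ PySem.Chars.find s.toList ['X'] < 0 := not_lt.mpr hf
  rw [if_neg hnneg, if_neg hnneg]
  obtain ⟨hpref, -⟩ := PySem.Chars.find_spec (s := s.toList) (sub := ['X']) hf
  obtain ⟨t, ht⟩ := hpref
  have hj : (PySem.Chars.find s.toList ['X']).toNat < s.toList.length := by
    have := congrArg List.length ht
    simp only [List.length_append, List.length_drop, List.length_cons, List.length_nil] at this
    omega
  have hX : s.toList[(PySem.Chars.find s.toList ['X']).toNat]'hj = 'X' := by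
    have h0 : (s.toList.drop (PySem.Chars.find s.toList ['X']).toNat)[0]'(by rw [← ht]; simp) = 'X' := by
      simp [← ht]
    simpa using h0
  set j := (PySem.Chars.find s.toList ['X']).toNat with hjdef
  set digits := s.toList.map pvDigit with hddef
  have hlen : digits.length = s.toList.length := by simp [hddef]
  have hd0 : digits[j]'(by omega) = 0 := by
    have h1 : digits[j]'(by omega) = pvDigit (s.toList[j]'hj) := by
      simp [hddef]
    rw [h1, hX]
    decide
  have hbase : luhnBaseGo digits.length 0 0 digits = luhnSum digits :=
    luhnBaseGo_eq digits digits.length 0 (by omega)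
  have hsetS : ∀ x : Int, luhnSum (digits.set j x) = luhnSum digits + lw (digits.length - 1 - j) x :=
    fun x => luhnSum_set digits j x (by omega) hd0
  have hRange : PySem.List.pyRange 0 10 1 = [0,1,2,3,4,5,6,7,8,9] := by decide
  rw [hRange]
  simp only [luhnsLoop, List.set_set, hsetS, hbase,
    PySem.Int.mod_eq_emod_of_pos (by norm_num : (0:Int) < 10), beq_iff_eq]
  generalize digits.length - 1 - j = k
  generalize luhnSum digits = base
  rcases Nat.mod_two_eq_zero_or_one k with hk | hk
  · rw [if_pos hk]
    exact arith_even base k hk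
  · rw [if_neg (show ¬ k % 2 = 0 by omega)]
    exact arith_odd base k hk
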